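-- pv_equiv track=rewrite | github.com/iljungr/ORBL_tools | CalcORFrelBLs.py | _index_of_kth_non_gap
-- ===== SOURCE A (Python) =====
-- def _index_of_kth_non_gap(bases, k, fromEnd = False) :
--     """Calculate the 0-based index of the kth non-gap base from the beginning or end."""
--     assert k > 0
--     numNonGap = 0
--     numBases = len(bases)
--     columnInd = 0 # To suppress dumb warning
--     for columnInd in (range(numBases - 1, -1, -1) if fromEnd else range(numBases)) :
--         if bases[columnInd] in '.-|' :
--             continue
--         numNonGap += 1
--         if numNonGap >= k :
--             break
--     assert numNonGap == k, 'Fewer than %s non-gap bases' % k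
--     return columnInd
-- ===== SOURCE B (Python) =====
-- def _index_of_kth_non_gap(bases, k, fromEnd = False) :
--     """Calculate the 0-based index of the kth non-gap base from the beginning or end."""
--     assert k > 0
--     non_gap = [i for i in range(len(bases)) if bases[i] not in '.-|']
--     assert len(non_gap) >= k, 'Fewer than %s non-gap bases' % k
--     return non_gap[-k] if fromEnd else non_gap[k - 1]
-- ===== Notes on version B (the rewrite author's own statement) =====
-- stated objective: simpler
-- what changed: Replaces the directional loop with running counter and early break by building the list of non-gap positions once and returning a single index (non_gap[-k] or non_gap[k-1]).
import Mathlib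
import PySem

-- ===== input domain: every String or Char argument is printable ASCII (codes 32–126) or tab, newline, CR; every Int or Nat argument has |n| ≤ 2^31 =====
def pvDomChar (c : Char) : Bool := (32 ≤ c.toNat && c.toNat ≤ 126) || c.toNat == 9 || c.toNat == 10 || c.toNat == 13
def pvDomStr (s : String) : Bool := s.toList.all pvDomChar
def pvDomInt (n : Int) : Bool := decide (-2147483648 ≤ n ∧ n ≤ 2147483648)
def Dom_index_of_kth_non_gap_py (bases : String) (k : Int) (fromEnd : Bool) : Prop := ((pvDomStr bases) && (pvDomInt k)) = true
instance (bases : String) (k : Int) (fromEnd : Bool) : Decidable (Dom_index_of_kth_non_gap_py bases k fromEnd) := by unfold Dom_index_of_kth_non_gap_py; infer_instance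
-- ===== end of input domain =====

-- B replaces A's directional loop with counter and early break by one pass that
-- collects all non-gap positions and then returns a single index of that list (objective: simpler).


-- ===== PORT A =====
-- `c in '.-|'` for the single character c
def pvGap (c : Char) : Bool := c == '.' || c == '-' || c == '|'

-- A's for-loop: state (numNonGap, columnInd); `continue` on a gap still assigns columnInd;
-- break as soon as numNonGap ≥ k.  pyGetD's default is never used: loop indices are in range.
def pvLoopA (chars : List Char) (k : Int) : List Int → Int → Int → Int × Int
  | [], c, ci => (c, ci)
  | i :: is, c, _ =>
      if pvGap (PySem.List.pyGetD chars i ' ') then pvLoopA chars k is c i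
      else if c + 1 ≥ k then (c + 1, i)
      else pvLoopA chars k is (c + 1) i

def index_of_kth_non_gap_py (bases : String) (k : Int) (fromEnd : Bool) : Int :=
  let chars := bases.toList
  let numBases : Int := chars.length
  (pvLoopA chars k
    (if fromEnd then PySem.List.pyRange (numBases - 1) (-1) (-1)
     else PySem.List.pyRange 0 numBases 1) 0 0).2

-- ===== PORT B =====
def index_of_kth_non_gap_py_alt (bases : String) (k : Int) (fromEnd : Bool) : Int :=
  let chars := bases.toList
  let nonGap : List Int :=
    (PySem.List.pyRange 0 (chars.length : Int) 1).filter
      (fun i => !pvGap (PySem.List.pyGetD chars i ' '))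
  ((PySem.List.pyGet? nonGap (if fromEnd then -k else k - 1)).getD 0)

-- ===== PRECONDITION & SPEC =====
-- Pre_ excludes exactly the inputs on which A raises AssertionError (k ≤ 0, or fewer
-- than k non-gap bases); B raises the same AssertionError there.
def Pre_index_of_kth_non_gap_py (bases : String) (k : Int) (fromEnd : Bool) : Prop :=
  0 < k ∧ k ≤ (bases.toList.countP (fun c => !pvGap c) : Int)
instance (bases : String) (k : Int) (fromEnd : Bool) : Decidable (Pre_index_of_kth_non_gap_py bases k fromEnd) := by unfold Pre_index_of_kth_non_gap_py; infer_instance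

def pvWitness_index_of_kth_non_gap_py : String × Int × Bool := ("AC.G", 2, true)

def Spec_index_of_kth_non_gap_py (bases : String) (k : Int) (fromEnd : Bool) (out : Int) : Prop := out = index_of_kth_non_gap_py_alt bases k fromEnd
instance (bases : String) (k : Int) (fromEnd : Bool) (out : Int) : Decidable (Spec_index_of_kth_non_gap_py bases k fromEnd out) := by unfold Spec_index_of_kth_non_gap_py; infer_instance

-- ===== CLAIM (what is proved, stated in full; the proofs are below) =====
def Claim_equal_index_of_kth_non_gap_py : Prop := ∀ (bases : String) (k : Int) (fromEnd : Bool), Dom_index_of_kth_non_gap_py bases k fromEnd → Pre_index_of_kth_non_gap_py bases k fromEnd → Spec_index_of_kth_non_gap_py bases k fromEnd (index_of_kth_non_gap_py bases k fromEnd)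

-- ===== LEMMAS AND PROOFS =====

-- the predicate B filters with
def pvP (chars : List Char) (i : Int) : Bool := !pvGap (PySem.List.pyGetD chars i ' ')

-- A's loop returns, as columnInd, the (k-c)-th element of the non-gap indices of its range
theorem pvLoopA_spec (chars : List Char) (k : Int) :
    ∀ (is : List Int) (c ci : Int), c < k →
    (k - c).toNat ≤ (is.filter (pvP chars)).length →
    (pvLoopA chars k is c ci).2 = (is.filter (pvP chars)).getD (k - c - 1).toNat 0 := by
  intro is
  induction is with
  | nil => intro c ci hc hl; simp [List.filter] at hl; omega
  | cons i is ih =>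
    intro c ci hc hl
    by_cases hg : pvGap (PySem.List.pyGetD chars i ' ')
    · have hp : pvP chars i = false := by simp [pvP, hg]
      rw [List.filter_cons_of_neg (by simp [hp])] at hl ⊢
      show (if pvGap (PySem.List.pyGetD chars i ' ') = true then pvLoopA chars k is c i
            else if c + 1 ≥ k then (c + 1, i) else pvLoopA chars k is (c + 1) i).2 = _
      rw [if_pos hg]
      exact ih c i hc hl
    · have hp : pvP chars i = true := by simp [pvP, hg]
      rw [List.filter_cons_of_pos hp] at hl ⊢
      show (if pvGap (PySem.List.pyGetD chars i ' ') = true then pvLoopA chars k is c i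
            else if c + 1 ≥ k then (c + 1, i) else pvLoopA chars k is (c + 1) i).2 = _
      rw [if_neg (by simp [hg])]
      by_cases hk : c + 1 ≥ k
      · rw [if_pos hk]
        have h0 : (k - c - 1).toNat = 0 := by omega
        simp [h0]
      · rw [if_neg hk]
        have h1 : (k - c - 1).toNat = (k - (c + 1) - 1).toNat + 1 := by omega
        have h2 : (k - (c + 1)).toNat ≤ (List.filter (pvP chars) is).length := by
          simp at hl; omega
        rw [ih (c + 1) i (by omega) h2, h1, List.getD_cons_succ]

-- counting non-gap positions of range(len(chars)) = counting non-gap characters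
theorem pvFilter_range_len (chars : List Char) :
    ((PySem.List.pyRange 0 (chars.length : Int) 1).filter (pvP chars)).length
      = chars.countP (fun c => !pvGap c) := by
  induction chars using List.reverseRecOn with
  | nil => simp [PySem.List.pyRange]
  | append_singleton l x ih =>
    have hsp : PySem.List.pyRange 0 ((l ++ [x]).length : Int) 1
        = PySem.List.pyRange 0 (l.length : Int) 1 ++ [(l.length : Int)] := by
      have h : ((l ++ [x]).length : Int) = (l.length : Int) + 1 := by simp
      rw [h, PySem.List.pyRange_one_succ_right (by positivity)]
    rw [hsp, List.filter_append, List.length_append, List.countP_append]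
    have h1 : (List.filter (pvP (l ++ [x])) (PySem.List.pyRange 0 (l.length : Int) 1))
        = (List.filter (pvP l) (PySem.List.pyRange 0 (l.length : Int) 1)) := by
      apply List.filter_congr
      intro i hi
      rw [PySem.List.mem_pyRange_one] at hi
      have h0 : i.toNat < l.length := by omega
      rw [pvP, pvP,
        PySem.List.pyGetD_eq_getElem _ _ hi.1 (by simp; omega),
        PySem.List.pyGetD_eq_getElem _ _ hi.1 (by simpa using hi.2),
        List.getElem_append_left h0]
    have h2 : pvP (l ++ [x]) (l.length : Int) = !pvGap x := by
      rw [pvP, PySem.List.pyGetD_eq_getElem _ _ (by positivity) (by simp)]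
      simp
    rw [h1, ih]
    simp only [List.filter_cons, List.filter_nil, h2, List.countP_cons]
    cases pvGap x <;> simp

-- ===== VERDICT (by name: the statement is the Claim_ definition above) =====
theorem index_of_kth_non_gap_py_spec : Claim_equal_index_of_kth_non_gap_py := by
  intro bases k fromEnd _ hpre
  obtain ⟨hk, hcnt⟩ := hpre
  unfold Spec_index_of_kth_non_gap_py index_of_kth_non_gap_py index_of_kth_non_gap_py_alt
  have hP : (fun i => !pvGap (PySem.List.pyGetD bases.toList i ' ')) = pvP bases.toList := rfl
  simp only [hP]
  have hlen : ((PySem.List.pyRange 0 (bases.toList.length : Int) 1).filter (pvP bases.toList)).length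
      = bases.toList.countP (fun c => !pvGap c) := pvFilter_range_len bases.toList
  have hkl : k.toNat ≤ ((PySem.List.pyRange 0 (bases.toList.length : Int) 1).filter (pvP bases.toList)).length := by
    omega
  cases fromEnd with
  | false =>
    simp only [Bool.false_eq_true, if_false]
    rw [pvLoopA_spec bases.toList k _ 0 0 (by omega) (by omega)]
    rw [PySem.List.pyGet?_of_nonneg _ (show (0:Int) ≤ k - 1 by omega)]
    rw [List.getD_eq_getElem?_getD]
    congr 2
    omega
  | true =>
    simp only [if_true]
    have hrev : PySem.List.pyRange ((bases.toList.length : Int) - 1) (-1) (-1)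
        = (PySem.List.pyRange 0 (bases.toList.length : Int) 1).reverse := by
      rw [PySem.List.pyRange_neg_one_eq_reverse]
      norm_num
    rw [hrev]
    rw [pvLoopA_spec bases.toList k _ 0 0 (by omega)
      (by rw [List.filter_reverse, List.length_reverse]; omega)]
    rw [List.filter_reverse]
    have hkn : -k = -((k.toNat : Nat) : Int) := by omega
    rw [hkn, PySem.List.pyGet?_neg_natCast _ _ (by omega) hkl]
    rw [List.getD_eq_getElem?_getD]
    rw [List.getElem?_reverse (by omega), List.getElem?_eq_getElem (by omega)]
    rw [List.getElem?_eq_getElem (by omega)]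
    simp only [Option.getD_some]
    congr 1
    omega
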